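-- pv_equiv track=rewrite | github.com/chasinglulu/tools | scripts/python_scripts/extract_pkey_param.py | big_endian_words
-- ===== SOURCE A (Python) =====
-- def big_endian_words(val):
-- 	"""Converts integer into array of big endian words"""
-- 	# Convert integer to hexadecimal string
-- 	str_val = hex(val)[2:]
-- 	# Split the string into bytes
-- 	bytearr = [str_val[i : i + 2] for i in range(0, len(str_val), 2)]
-- 	# Group bytes into sets of 4 bytes
-- 	sets = [bytearr[i : i + 4] for i in range(0, len(bytearr), 4)]
-- 	# Reverse the bytes in each group (BIG endian)
-- 	# list(map(list.reverse, sets))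
-- 	# Join bytes in each group (WORD)
-- 	sets = list(map(''.join, sets))
-- 	# Convert to lower case
-- 	sets = list(map(str.lower, sets))
-- 	# Append '0x' to each word
-- 	sets = list(map('0x'.__add__, sets))
--
-- 	return sets
-- ===== SOURCE B (Python) =====
-- def big_endian_words(val):
-- 	"""Converts integer into array of big endian words"""
-- 	s = hex(val)[2:].lower()
-- 	return ['0x' + s[i : i + 8] for i in range(0, len(s), 8)]
-- ===== Notes on version B (the rewrite author's own statement) =====
-- stated objective: simpler
-- what changed: B drops A's byte-splitting, group-of-4 nesting and the three map stages (join, lower, prefix), slicing the hex string directly into eight-character words in one comprehension.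
import Mathlib
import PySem

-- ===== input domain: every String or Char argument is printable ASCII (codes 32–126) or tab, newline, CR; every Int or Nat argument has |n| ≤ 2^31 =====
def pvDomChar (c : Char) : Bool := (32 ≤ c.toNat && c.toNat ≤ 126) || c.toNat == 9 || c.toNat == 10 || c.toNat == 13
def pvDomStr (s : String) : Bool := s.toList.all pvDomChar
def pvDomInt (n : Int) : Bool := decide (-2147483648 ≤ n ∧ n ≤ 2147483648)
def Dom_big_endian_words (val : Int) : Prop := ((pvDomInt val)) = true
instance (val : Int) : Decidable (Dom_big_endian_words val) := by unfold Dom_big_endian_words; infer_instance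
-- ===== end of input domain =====

-- B replaces A's byte-split / group-of-4 / join / lower / prefix pipeline by one direct
-- eight-character slicing pass over the hex string (objective: simpler; same output everywhere).

-- Shared helper: exact port of Python's built-in hex(). hex(v) = '-0x' + digits for v < 0,
-- '0x0' for 0, '0x' + lowercase digits (no leading zeros) for v > 0.
def pyHexDigit (n : Nat) : Char :=
  if n < 10 then Char.ofNat ('0'.toNat + n) else Char.ofNat ('a'.toNat + (n - 10))

def pyHexNat (n : Nat) : List Char :=
  if h : n = 0 then []
  else pyHexNat (n / 16) ++ [pyHexDigit (n % 16)]
decreasing_by exact Nat.div_lt_self (Nat.pos_of_ne_zero h) (by omega)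

def pyHexChars (v : Int) : List Char :=
  if v < 0 then '-' :: '0' :: 'x' :: pyHexNat v.natAbs
  else if v = 0 then ['0', 'x', '0']
  else '0' :: 'x' :: pyHexNat v.toNat

-- ===== PORT A =====
def big_endian_words (val : Int) : List String :=
  -- str_val = hex(val)[2:]
  let str_val := PySem.List.slice (pyHexChars val) (some 2) none
  -- bytearr = [str_val[i : i + 2] for i in range(0, len(str_val), 2)]
  let bytearr := (PySem.List.pyRange 0 (str_val.length : Int) 2).map
    (fun i => PySem.List.slice str_val (some i) (some (i + 2)))
  -- sets = [bytearr[i : i + 4] for i in range(0, len(bytearr), 4)]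
  let sets := (PySem.List.pyRange 0 (bytearr.length : Int) 4).map
    (fun i => PySem.List.slice bytearr (some i) (some (i + 4)))
  -- sets = list(map(''.join, sets))
  let sets := sets.map (fun g => PySem.Chars.join [] g)
  -- sets = list(map(str.lower, sets))
  let sets := sets.map PySem.Chars.lower
  -- sets = list(map('0x'.__add__, sets))
  let sets := sets.map (fun w => ['0', 'x'] ++ w)
  sets.map String.ofList

-- ===== PORT B =====
def big_endian_words_alt (val : Int) : List String :=
  -- s = hex(val)[2:].lower()
  let s := PySem.Chars.lower (PySem.List.slice (pyHexChars val) (some 2) none)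
  -- ['0x' + s[i : i + 8] for i in range(0, len(s), 8)]
  (PySem.List.pyRange 0 (s.length : Int) 8).map
    (fun i => String.ofList (['0', 'x'] ++ PySem.List.slice s (some i) (some (i + 8))))

-- ===== PRECONDITION & SPEC =====
def Spec_big_endian_words (val : Int) (out : List String) : Prop := out = big_endian_words_alt val
instance (val : Int) (out : List String) : Decidable (Spec_big_endian_words val out) := by unfold Spec_big_endian_words; infer_instance

-- ===== CLAIM (what is proved, stated in full; the proofs are below) =====
def Claim_equal_big_endian_words : Prop := ∀ (val : Int), Dom_big_endian_words val → Spec_big_endian_words val (big_endian_words val)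

-- ===== LEMMAS AND PROOFS =====

-- Successive k-slices of a list (what 'for i in range(0, len(xs), k): xs[i:i+k]' yields).
def pvChunk {α : Type} (k : Nat) (hk : 0 < k) (cs : List α) : List (List α) :=
  if h : cs = [] then []
  else cs.take k :: pvChunk k hk (cs.drop k)
termination_by cs.length
decreasing_by
  have : cs.length ≠ 0 := by simpa using h
  simp; omega

theorem pvChunk_nil {α : Type} (k : Nat) (hk : 0 < k) : pvChunk k hk ([] : List α) = [] := by
  rw [pvChunk]; rfl

theorem pvChunk_cons {α : Type} (k : Nat) (hk : 0 < k) (cs : List α) (h : cs ≠ []) :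
    pvChunk k hk cs = cs.take k :: pvChunk k hk (cs.drop k) := by
  rw [pvChunk, dif_neg h]

theorem pyRange_pos_cons (a b s : Int) (hs : 0 < s) (hab : a < b) :
    PySem.List.pyRange a b s = a :: PySem.List.pyRange (a + s) b s := by
  rw [PySem.List.pyRange_of_pos _ _ hs, PySem.List.pyRange_of_pos _ _ hs]
  have key : (b - a + s - 1) / s = (b - (a + s) + s - 1) / s + 1 := by
    have : b - a + s - 1 = (b - (a+s) + s - 1) + 1 * s := by ring
    rw [this, Int.add_mul_ediv_right _ _ (by omega)]
  by_cases h2 : a + s < b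
  · simp only [if_pos hab, if_pos h2, key]
    have hnn : 0 ≤ (b - (a+s) + s - 1) / s := Int.ediv_nonneg (by omega) (by omega)
    rw [show ((b - (a+s) + s - 1) / s + 1).toNat = ((b - (a+s) + s - 1) / s).toNat + 1 by omega]
    rw [List.range_succ_eq_map]
    simp [List.map_map, Function.comp]
    intro k _; ring
  · simp only [if_pos hab, if_neg h2]
    have h0 : (b - (a + s) + s - 1) / s = 0 := Int.ediv_eq_zero_of_lt (by omega) (by omega)
    rw [key, h0]
    simp

theorem pyRange_pos_shift (a b s : Int) (hs : 0 < s) :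
    PySem.List.pyRange (a + s) b s = (PySem.List.pyRange a (b - s) s).map (· + s) := by
  rw [PySem.List.pyRange_of_pos _ _ hs, PySem.List.pyRange_of_pos _ _ hs]
  rw [List.map_map]
  have hcnt : (if a + s < b then ((b - (a + s) + s - 1) / s).toNat else 0)
      = (if a < b - s then ((b - s - a + s - 1) / s).toNat else 0) := by
    by_cases h : a + s < b
    · rw [if_pos h, if_pos (by omega)]; congr 2; ring
    · rw [if_neg h, if_neg (by omega)]
  rw [hcnt]
  apply List.map_congr_left; intro k _; simp [Function.comp]; ring

theorem pvChunk_eq {α : Type} (k : Nat) (hk : 0 < k) (cs : List α) :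
    (PySem.List.pyRange 0 (cs.length : Int) (k : Int)).map
      (fun i => PySem.List.slice cs (some i) (some (i + (k : Int)))) = pvChunk k hk cs := by
  induction cs using pvChunk.induct k hk with
  | case1 =>
    rw [pvChunk]
    simp [PySem.List.pyRange_of_pos _ _ (by exact_mod_cast hk : (0:Int) < k)]
  | case2 cs h ih =>
    rw [pvChunk, dif_neg h]
    have hlen : 0 < cs.length := List.length_pos_iff.mpr h
    have hks : (0:Int) < k := by exact_mod_cast hk
    rw [pyRange_pos_cons 0 _ _ hks (by exact_mod_cast hlen), List.map_cons]
    congr 1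
    · rw [PySem.List.slice_toNat _ le_rfl (by omega)]
      simp
    · have hsh := pyRange_pos_shift 0 (cs.length : Int) (k : Int) hks
      simp only [zero_add] at hsh ⊢
      rw [hsh, List.map_map, ← ih]
      have hlen2 : ((cs.drop k).length : Int) = max ((cs.length : Int) - k) 0 := by
        simp; omega
      by_cases hkl : (k : Int) < cs.length
      · have : ((cs.drop k).length : Int) = (cs.length : Int) - k := by rw [hlen2]; omega
        rw [this]
        apply List.map_congr_left
        intro i hi
        have h0i : 0 ≤ i := ((PySem.List.mem_pyRange_iff_of_pos hks i).mp hi).1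
        simp only [Function.comp]
        rw [PySem.List.slice_toNat _ (by omega) (by omega),
            PySem.List.slice_toNat _ (by omega) (by omega)]
        rw [List.drop_drop]
        congr 1
        · omega
        · congr 1; omega
      · have h1 : PySem.List.pyRange 0 ((cs.length : Int) - k) k = [] := by
          rw [PySem.List.pyRange_of_pos _ _ hks,
            if_neg (by omega : ¬ (0:Int) < (cs.length:Int) - k)]
          rfl
        have h2 : PySem.List.pyRange 0 ((cs.drop k).length : Int) k = [] := by
          have hz : ((cs.drop k).length : Int) = 0 := by rw [hlen2]; omega
          rw [hz, PySem.List.pyRange_of_pos _ _ hks, if_neg (by omega : ¬ (0:Int) < (0:Int))]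
          rfl
        rw [h1, h2]; simp

theorem pvJoin_nil (g : List (List Char)) : PySem.Chars.join [] g = g.flatten := by
  induction g with
  | nil => rfl
  | cons h t ih =>
    simp only [PySem.Chars.join, List.intercalate] at *
    cases t with
    | nil => simp
    | cons h2 t2 => simp_all [List.intersperse]

theorem pvChunk_map {α β : Type} (k : Nat) (hk : 0 < k) (f : α → β) (cs : List α) :
    pvChunk k hk (cs.map f) = (pvChunk k hk cs).map (List.map f) := by
  induction cs using pvChunk.induct k hk with
  | case1 => simp [pvChunk_nil]
  | case2 cs h ih =>
    rw [pvChunk_cons k hk _ (by simpa using h), pvChunk_cons k hk cs h]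
    rw [List.map_cons, List.map_take, ← List.map_drop, ih]

theorem pvChunk_flatten_id {α : Type} (k : Nat) (hk : 0 < k) (cs : List α) :
    (pvChunk k hk cs).flatten = cs := by
  induction cs using pvChunk.induct k hk with
  | case1 => simp [pvChunk_nil]
  | case2 cs h ih =>
    rw [pvChunk_cons k hk cs h, List.flatten_cons, ih, List.take_append_drop]

theorem pvChunk_take {α : Type} (k : Nat) (hk : 0 < k) (m : Nat) (cs : List α) :
    (pvChunk k hk cs).take m = pvChunk k hk (cs.take (m * k)) := by
  induction m generalizing cs with
  | zero => simp [pvChunk_nil]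
  | succ m ih =>
    by_cases h : cs = []
    · subst h; simp [pvChunk_nil]
    · have hne : cs.take ((m + 1) * k) ≠ [] := by
        simp [List.take_eq_nil_iff, h]
        omega
      rw [pvChunk_cons k hk cs h, List.take_succ_cons, ih, pvChunk_cons k hk _ hne]
      congr 1
      · rw [List.take_take, Nat.min_eq_left (Nat.le_mul_of_pos_left k (Nat.succ_pos m))]
      · rw [List.drop_take, Nat.succ_mul, Nat.add_sub_cancel]

theorem pvChunk_drop {α : Type} (k : Nat) (hk : 0 < k) (m : Nat) (cs : List α) :
    (pvChunk k hk cs).drop m = pvChunk k hk (cs.drop (m * k)) := by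
  induction m generalizing cs with
  | zero => simp
  | succ m ih =>
    by_cases h : cs = []
    · subst h; simp [pvChunk_nil]
    · rw [pvChunk_cons k hk cs h, List.drop_succ_cons, ih, List.drop_drop]
      congr 1
      ring_nf

theorem pvChunk_flatten (cs : List Char) :
    ((pvChunk 4 (by omega) (pvChunk 2 (by omega) cs)).map (fun g => PySem.Chars.join [] g))
      = pvChunk 8 (by omega) cs := by
  induction cs using pvChunk.induct 8 (by omega) with
  | case1 => simp [pvChunk_nil]
  | case2 cs h ih =>
    have h2 : pvChunk 2 (by omega) cs ≠ [] := by rw [pvChunk_cons 2 (by omega) cs h]; simp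
    rw [pvChunk_cons 4 (by omega) _ h2, pvChunk_cons 8 (by omega) cs h, List.map_cons]
    congr 1
    · rw [pvChunk_take 2 (by omega) 4 cs, pvJoin_nil, pvChunk_flatten_id]
    · rw [pvChunk_drop 2 (by omega) 4 cs, ih]

-- ===== VERDICT (by name: the statement is the Claim_ definition above) =====
theorem big_endian_words_spec : Claim_equal_big_endian_words := by
  intro val _
  unfold Spec_big_endian_words big_endian_words big_endian_words_alt
  dsimp only
  have e2 := pvChunk_eq 2 (by omega) (PySem.List.slice (pyHexChars val) (some 2) none)
  norm_num at e2
  rw [e2]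
  have e4 := pvChunk_eq 4 (by omega) (pvChunk 2 (by omega) (PySem.List.slice (pyHexChars val) (some 2) none))
  norm_num at e4
  rw [e4]
  have e8 := pvChunk_eq 8 (by omega) (PySem.Chars.lower (PySem.List.slice (pyHexChars val) (some 2) none))
  norm_num at e8
  have hfac : (PySem.List.pyRange 0 ((PySem.Chars.lower (PySem.List.slice (pyHexChars val) (some 2) none)).length : Int) 8).map
      (fun i => String.ofList (['0', 'x'] ++ PySem.List.slice (PySem.Chars.lower (PySem.List.slice (pyHexChars val) (some 2) none)) (some i) (some (i + 8))))
      = ((PySem.List.pyRange 0 ((PySem.Chars.lower (PySem.List.slice (pyHexChars val) (some 2) none)).length : Int) 8).map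
        (fun i => PySem.List.slice (PySem.Chars.lower (PySem.List.slice (pyHexChars val) (some 2) none)) (some i) (some (i + 8)))).map
        (fun w => String.ofList (['0', 'x'] ++ w)) := by
    rw [List.map_map]; rfl
  rw [hfac, e8]
  rw [List.map_map, pvChunk_flatten]
  have hl : PySem.Chars.lower (PySem.List.slice (pyHexChars val) (some 2) none)
      = (PySem.List.slice (pyHexChars val) (some 2) none).map PySem.Chars.lowerChar := rfl
  rw [hl, pvChunk_map]
  simp [List.map_map, Function.comp, PySem.Chars.lower]
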